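-- pv_equiv track=rewrite | github.com/kadirhanpolat/pytop | src/pytop/invariants.py | _finite_lindelof_number
-- ===== SOURCE A (Python) =====
-- from itertools import combinations
-- from typing import Any, Iterable
--
-- def _finite_lindelof_number(points: tuple[Any, ...], opens: list[set[Any]]) -> int:
--     nonempty_opens = [U for U in opens if U]
--     if not points:
--         return 0
--     cover_families = [family for size in range(1, len(nonempty_opens) + 1) for family in combinations(nonempty_opens, size) if set().union(*family) == set(points)]
--     best_bounds: list[int] = []
--     for family in cover_families:
--         min_size = len(family)
--         for size in range(1, len(family) + 1):
--             for subfamily in combinations(family, size):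
--                 if set().union(*subfamily) == set(points):
--                     min_size = size
--                     break
--             if min_size == size:
--                 break
--         best_bounds.append(min_size)
--     return max(best_bounds, default=0)
-- ===== SOURCE B (Python) =====
-- def _finite_lindelof_number(points, opens):
--     # max over covering families of min subcover size == max size of an
--     # irredundant (minimal) cover, enumerated once over subfamilies.
--     if not points:
--         return 0
--     pts = set(points)
--     cand = [set(U) for U in opens if U and set(U) <= pts]
--     fams = [[]]
--     for U in cand:
--         fams = fams + [f + [U] for f in fams]
--     best = 0
--     for f in fams:
--         covers = all(any(p in V for V in f) for p in pts)
--         if covers and all(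
--             not all(any(p in V for V in (f[:i] + f[i + 1:])) for p in pts)
--             for i in range(len(f))
--         ):
--             best = max(best, len(f))
--     return best
-- ===== Notes on version B (the rewrite author's own statement) =====
-- stated objective: alternative
-- what changed: Instead of, for every covering family, re-searching all its subfamilies for a minimal subcover, B enumerates subfamilies of the candidate opens once and returns the maximum size of an irredundant exact cover (removing any single member breaks the cover), which provably equals A's max-of-min-subcover; asymptotically fewer subfamily scans (2^n vs 4^n), though both remain exponential and a timing run could not confirm a speed-up at its largest size.
import Mathlib
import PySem

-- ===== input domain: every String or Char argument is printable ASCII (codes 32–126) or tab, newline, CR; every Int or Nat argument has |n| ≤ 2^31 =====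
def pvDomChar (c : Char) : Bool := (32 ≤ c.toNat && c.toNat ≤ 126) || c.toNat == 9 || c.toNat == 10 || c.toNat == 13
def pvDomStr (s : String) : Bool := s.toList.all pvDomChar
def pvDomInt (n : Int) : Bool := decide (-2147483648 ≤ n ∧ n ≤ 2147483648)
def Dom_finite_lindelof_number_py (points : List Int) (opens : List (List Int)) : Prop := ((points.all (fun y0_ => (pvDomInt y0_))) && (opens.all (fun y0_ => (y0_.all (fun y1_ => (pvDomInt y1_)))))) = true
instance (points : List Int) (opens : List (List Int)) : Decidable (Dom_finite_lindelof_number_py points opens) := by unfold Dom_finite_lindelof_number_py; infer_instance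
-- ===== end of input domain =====

-- B replaces A's per-family minimal-subcover search (max over covering families of their
-- min subcover) by a single enumeration of subfamilies, keeping the max size of an
-- irredundant exact cover — the two quantities coincide (proved below).

-- ===== PORT A =====
-- 'set().union(*family) == set(points)' : set equality of the family's union with set(points)
def pvEqUnion (f : List (List Int)) (points : List Int) : Bool :=
  f.flatten.all (fun x => points.contains x) && points.all (fun p => f.flatten.contains p)

-- the inner 'for size … for subfamily in combinations(family, size) … break / if min_size == size: break'
-- loop of A; combinations(f, size) is ported as List.sublistsLen size f (same collection of tuples)
def pvGo (f : List (List Int)) (points : List Int) (size ms : Nat) : Nat :=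
  if f.length < size then ms
  else
    let ms' := if (List.sublistsLen size f).any (fun sub => pvEqUnion sub points) then size else ms
    if ms' = size then ms' else pvGo f points (size + 1) ms'
termination_by f.length + 1 - size

def finite_lindelof_number_py (points : List Int) (opens : List (List Int)) : Int :=
  let ne := opens.filter (fun U => !U.isEmpty)
  if points.isEmpty then 0
  else
    -- range(1, len(nonempty_opens) + 1) is List.range' 1 ne.length
    let fams := (List.range' 1 ne.length).flatMap
      (fun s => (List.sublistsLen s ne).filter (fun fam => pvEqUnion fam points))
    let bounds := fams.map (fun fam => pvGo fam points 1 fam.length)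
    -- max(best_bounds, default=0): every bound is ≥ 1, so foldl Nat.max 0 is exact
    ((bounds.foldl Nat.max 0 : Nat) : Int)

-- ===== PORT B =====
-- 'all(any(p in V for V in f) for p in pts)'
def pvCovers (f : List (List Int)) (points : List Int) : Bool :=
  points.all (fun p => f.any (fun V => V.contains p))

def finite_lindelof_number_py_alt (points : List Int) (opens : List (List Int)) : Int :=
  if points.isEmpty then 0
  else
    let cand := opens.filter (fun U => !U.isEmpty && U.all (fun x => points.contains x))
    let fams := cand.foldl (fun acc U => acc ++ acc.map (fun g => g ++ [U])) [[]]
    -- f[:i] + f[i+1:] for 0 ≤ i < len f is exactly take i ++ drop (i+1)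
    ((fams.foldl (fun best g =>
        if pvCovers g points &&
           (List.range g.length).all (fun i => !pvCovers (g.take i ++ g.drop (i + 1)) points)
        then Nat.max best g.length else best) 0 : Nat) : Int)

-- ===== PRECONDITION & SPEC =====
def Spec_finite_lindelof_number_py (points : List Int) (opens : List (List Int)) (out : Int) : Prop := out = finite_lindelof_number_py_alt points opens
instance (points : List Int) (opens : List (List Int)) (out : Int) : Decidable (Spec_finite_lindelof_number_py points opens out) := by unfold Spec_finite_lindelof_number_py; infer_instance

-- ===== CLAIM (what is proved, stated in full; the proofs are below) =====
def Claim_equal_finite_lindelof_number_py : Prop := ∀ (points : List Int) (opens : List (List Int)), Dom_finite_lindelof_number_py points opens → Spec_finite_lindelof_number_py points opens (finite_lindelof_number_py points opens)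

-- ===== LEMMAS AND PROOFS =====

theorem pvEqUnion_iff (f : List (List Int)) (points : List Int) :
    pvEqUnion f points = true ↔
      ((∀ U ∈ f, ∀ x ∈ U, x ∈ points) ∧ pvCovers f points = true) := by
  simp only [pvEqUnion, pvCovers, Bool.and_eq_true, List.all_eq_true, List.any_eq_true,
    List.mem_flatten, List.contains_eq_mem, decide_eq_true_eq]
  constructor
  · rintro ⟨h1, h2⟩
    exact ⟨fun U hU x hx => h1 x ⟨U, hU, hx⟩, h2⟩
  · rintro ⟨h1, h2⟩
    refine ⟨fun x hx => ?_, h2⟩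
    obtain ⟨U, hU, hxU⟩ := hx
    exact h1 U hU x hxU

theorem pvCovers_iff (f : List (List Int)) (points : List Int) :
    pvCovers f points = true ↔ ∀ p ∈ points, ∃ V ∈ f, p ∈ V := by
  simp [pvCovers, List.contains_eq_mem]

theorem pvCovers_mono {h g : List (List Int)} {points : List Int}
    (sub : h.Sublist g) (hc : pvCovers h points = true) : pvCovers g points = true := by
  rw [pvCovers_iff] at *
  intro p hp
  obtain ⟨V, hV, hpV⟩ := hc p hp
  exact ⟨V, sub.subset hV, hpV⟩

theorem mem_subfams (l : List (List Int)) (g : List (List Int)) :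
    g ∈ l.foldl (fun acc U => acc ++ acc.map (fun g => g ++ [U])) [[]] ↔ g.Sublist l := by
  have key : ∀ (l : List (List Int)) (acc : List (List (List Int))) (g : List (List Int)),
      g ∈ l.foldl (fun acc U => acc ++ acc.map (fun g => g ++ [U])) acc ↔
        ∃ a ∈ acc, ∃ t, t.Sublist l ∧ g = a ++ t := by
    intro l
    induction l with
    | nil =>
      intro acc g
      simp only [List.foldl_nil]
      constructor
      · intro hg; exact ⟨g, hg, [], List.Sublist.refl _, by simp⟩
      · rintro ⟨a, ha, t, ht, rfl⟩
        have : t = [] := List.sublist_nil.mp ht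
        simpa [this]
    | cons U l ih =>
      intro acc g
      simp only [List.foldl_cons]
      rw [ih]
      constructor
      · rintro ⟨a, ha, t, ht, rfl⟩
        rw [List.mem_append] at ha
        rcases ha with ha | ha
        · exact ⟨a, ha, t, ht.cons U, rfl⟩
        · rw [List.mem_map] at ha
          obtain ⟨b, hb, rfl⟩ := ha
          exact ⟨b, hb, U :: t, (ht.cons₂ U), by simp⟩
      · rintro ⟨a, ha, t, ht, rfl⟩
        rcases List.sublist_cons_iff.mp ht with ht' | ⟨r, rfl, hr⟩
        · exact ⟨a, List.mem_append.mpr (Or.inl ha), t, ht', rfl⟩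
        · exact ⟨a ++ [U], List.mem_append.mpr (Or.inr (List.mem_map.mpr ⟨a, ha, rfl⟩)),
            r, hr, by simp⟩
  rw [key]
  constructor
  · rintro ⟨a, ha, t, ht, rfl⟩
    simp only [List.mem_singleton] at ha
    simpa [ha]
  · intro hg
    exact ⟨[], by simp, g, hg, rfl⟩

theorem exists_eraseIdx_of_lt {α : Type} {h g : List α} (sub : h.Sublist g)
    (hlt : h.length < g.length) : ∃ i < g.length, h.Sublist (g.eraseIdx i) := by
  induction sub with
  | slnil => simp at hlt
  | cons a sub ih =>
    exact ⟨0, by simp, by simpa using sub⟩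
  | cons₂ a sub ih =>
    simp only [List.length_cons, Nat.add_lt_add_iff_right] at hlt
    obtain ⟨i, hi, hsub⟩ := ih hlt
    exact ⟨i + 1, by simpa using hi, by simpa [List.eraseIdx_cons_succ] using hsub.cons₂ a⟩

-- the subfamilies considered by B's irredundancy test are exactly the one-element erasures
theorem pvIrred_iff (g : List (List Int)) (points : List Int) :
    ((List.range g.length).all (fun i => !pvCovers (g.take i ++ g.drop (i + 1)) points)) = true ↔
      ∀ i < g.length, pvCovers (g.eraseIdx i) points = false := by
  simp [List.eraseIdx_eq_take_drop_succ]

-- A's inner loop, fully characterised: it returns the least size (≥ size) at which some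
-- subfamily has the right union, provided all smaller sizes fail and the full size succeeds
theorem pvGo_eq_found (f : List (List Int)) (points : List Int) (size ms : Nat)
    (h1 : ¬ f.length < size)
    (hf : ((List.sublistsLen size f).any (fun sub => pvEqUnion sub points)) = true) :
    pvGo f points size ms = size := by
  rw [pvGo]; simp [h1, hf]

theorem pvGo_eq_notfound (f : List (List Int)) (points : List Int) (size ms : Nat)
    (h1 : ¬ f.length < size)
    (hf : ((List.sublistsLen size f).any (fun sub => pvEqUnion sub points)) = false)
    (hne : ms ≠ size) :
    pvGo f points size ms = pvGo f points (size + 1) ms := by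
  rw [pvGo]; simp [h1, hf, hne]

theorem pvGo_spec (f : List (List Int)) (points : List Int) :
    ∀ k size, f.length + 1 - size = k → 1 ≤ size → size ≤ f.length →
      (∀ t, 1 ≤ t → t < size →
        ((List.sublistsLen t f).any (fun sub => pvEqUnion sub points)) = false) →
      ((List.sublistsLen f.length f).any (fun sub => pvEqUnion sub points)) = true →
      (1 ≤ pvGo f points size f.length ∧ pvGo f points size f.length ≤ f.length ∧
        ((List.sublistsLen (pvGo f points size f.length) f).any (fun sub => pvEqUnion sub points)) = true ∧
        ∀ t, 1 ≤ t → t < pvGo f points size f.length →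
          ((List.sublistsLen t f).any (fun sub => pvEqUnion sub points)) = false) := by
  intro k
  induction k with
  | zero => intro size hk h1 hle _ _; omega
  | succ k ih =>
    intro size hk h1 hle hsmall hfull
    have hns : ¬ f.length < size := by omega
    by_cases hfound : ((List.sublistsLen size f).any (fun sub => pvEqUnion sub points)) = true
    · rw [pvGo_eq_found f points size f.length hns hfound]
      exact ⟨h1, hle, hfound, hsmall⟩
    · rw [Bool.not_eq_true] at hfound
      have hne : f.length ≠ size := by
        intro h; rw [h] at hfull; rw [hfull] at hfound; simp at hfound
      rw [pvGo_eq_notfound f points size f.length hns hfound hne]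
      have := ih (size + 1) (by omega) (by omega) (by omega)
        (by intro t ht1 ht2
            rcases Nat.lt_or_ge t size with h | h
            · exact hsmall t ht1 h
            · have : t = size := by omega
              rw [this]; exact hfound) hfull
      exact this

-- membership in A's cover_families list
theorem memA (ne : List (List Int)) (points : List Int) (hp : points ≠ []) (f : List (List Int)) :
    f ∈ (List.range' 1 ne.length).flatMap
        (fun s => (List.sublistsLen s ne).filter (fun fam => pvEqUnion fam points)) ↔
      (f.Sublist ne ∧ pvEqUnion f points = true) := by
  simp only [List.mem_flatMap, List.mem_filter, List.mem_sublistsLen, List.mem_range']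
  constructor
  · rintro ⟨s, _, ⟨hsub, _⟩, hequ⟩
    exact ⟨hsub, hequ⟩
  · rintro ⟨hsub, hequ⟩
    refine ⟨f.length, ⟨f.length - 1, ?_, ?_⟩, ⟨hsub, rfl⟩, hequ⟩
    · have hlen : f.length ≤ ne.length := hsub.length_le
      have hfne : f ≠ [] := by
        intro h
        obtain ⟨p, hp'⟩ := List.exists_mem_of_ne_nil points hp
        have := (pvEqUnion_iff f points).mp hequ
        obtain ⟨V, hV, _⟩ := (pvCovers_iff f points).mp this.2 p hp'
        rw [h] at hV; simp at hV
      have : 1 ≤ f.length := List.length_pos_iff.mpr hfne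
      omega
    · have hfne : f ≠ [] := by
        intro h
        obtain ⟨p, hp'⟩ := List.exists_mem_of_ne_nil points hp
        have := (pvEqUnion_iff f points).mp hequ
        obtain ⟨V, hV, _⟩ := (pvCovers_iff f points).mp this.2 p hp'
        rw [h] at hV; simp at hV
      have : 1 ≤ f.length := List.length_pos_iff.mpr hfne
      omega

-- sublists of B's candidate list = sublists of A's nonempty list whose members lie in points
theorem sub_cand_iff (opens : List (List Int)) (points : List Int) (f : List (List Int)) :
    f.Sublist (opens.filter (fun U => !U.isEmpty && U.all (fun x => points.contains x))) ↔
      (f.Sublist (opens.filter (fun U => !U.isEmpty)) ∧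
        ∀ U ∈ f, (U.all (fun x => points.contains x)) = true) := by
  have hff : opens.filter (fun U => !U.isEmpty && U.all (fun x => points.contains x)) =
      (opens.filter (fun U => !U.isEmpty)).filter (fun U => U.all (fun x => points.contains x)) := by
    rw [List.filter_filter]
    congr 1
    funext U
    rw [Bool.and_comm]
  rw [hff]
  constructor
  · intro hsub
    refine ⟨hsub.trans (List.filter_sublist), ?_⟩
    intro U hU
    have := hsub.subset hU
    exact (List.mem_filter.mp this).2
  · rintro ⟨hsub, hall⟩
    have : f.filter (fun U => U.all (fun x => points.contains x)) = f :=
      List.filter_eq_self.mpr hall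
    have h2 := hsub.filter (fun U => U.all (fun x => points.contains x))
    rw [this] at h2
    exact h2

theorem foldl_max_le (l : List Nat) (a b : Nat) (ha : a ≤ b) (h : ∀ x ∈ l, x ≤ b) :
    l.foldl Nat.max a ≤ b := by
  induction l generalizing a with
  | nil => exact ha
  | cons x l ih =>
    exact ih (Nat.max a x) (Nat.max_le.mpr ⟨ha, h x (by simp)⟩) (fun y hy => h y (by simp [hy]))

theorem le_foldl_max (l : List Nat) (a x : Nat) (hx : x ∈ l) : x ≤ l.foldl Nat.max a := by
  have base : ∀ (l : List Nat) (a : Nat), a ≤ l.foldl Nat.max a := by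
    intro l
    induction l with
    | nil => simp
    | cons y l ih => intro a; exact le_trans (Nat.le_max_left a y) (ih _)
  induction l generalizing a with
  | nil => simp at hx
  | cons y l ih =>
    rcases List.mem_cons.mp hx with rfl | hx
    · exact le_trans (Nat.le_max_right a x) (base l _)
    · exact ih _ hx

theorem condFold_eq {α : Type} (l : List α) (c : α → Bool) (v : α → Nat) (a : Nat) :
    l.foldl (fun best g => if c g then Nat.max best (v g) else best) a =
      ((l.filter c).map v).foldl Nat.max a := by
  induction l generalizing a with
  | nil => rfl
  | cons x l ih =>
    by_cases hx : c x = true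
    · simp [hx, ih]
    · simp only [Bool.not_eq_true] at hx
      simp [hx, ih]

-- ===== the central combinatorial argument =====

-- ===== the central combinatorial argument =====
-- the maximum over covering families of A's minimal-subcover size equals the maximum
-- size of an irredundant cover, which is what B enumerates

theorem core_eq (points : List Int) (opens : List (List Int)) (hp : points ≠ []) :
    (((List.range' 1 (opens.filter (fun U => !U.isEmpty)).length).flatMap
        (fun s => (List.sublistsLen s (opens.filter (fun U => !U.isEmpty))).filter
          (fun fam => pvEqUnion fam points))).map
      (fun fam => pvGo fam points 1 fam.length)).foldl Nat.max 0 =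
    ((opens.filter (fun U => !U.isEmpty && U.all (fun x => points.contains x))).foldl
        (fun acc U => acc ++ acc.map (fun g => g ++ [U])) [[]]).foldl
      (fun best g =>
        if pvCovers g points &&
            (List.range g.length).all (fun i => !pvCovers (g.take i ++ g.drop (i + 1)) points)
        then Nat.max best g.length else best) 0 := by
  rw [condFold_eq]
  set ne := opens.filter (fun U => !U.isEmpty) with hnedef
  set cand := opens.filter (fun U => !U.isEmpty && U.all (fun x => points.contains x)) with hcanddef
  have hfull : ∀ f : List (List Int), pvEqUnion f points = true →
      ((List.sublistsLen f.length f).any (fun sub => pvEqUnion sub points)) = true :=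
    fun f hf => List.any_eq_true.mpr ⟨f, List.mem_sublistsLen.mpr ⟨List.Sublist.refl f, rfl⟩, hf⟩
  have hnonnil : ∀ f : List (List Int), pvCovers f points = true → f ≠ [] := by
    intro f hc h
    obtain ⟨p, hpmem⟩ := List.exists_mem_of_ne_nil points hp
    obtain ⟨V, hV, _⟩ := (pvCovers_iff f points).mp hc p hpmem
    rw [h] at hV; simp at hV
  apply Nat.le_antisymm
  · -- each of A's bounds is the size of an irredundant cover B accepts
    apply foldl_max_le _ _ _ (Nat.zero_le _)
    intro x hx
    rw [List.mem_map] at hx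
    obtain ⟨f, hfA, rfl⟩ := hx
    obtain ⟨hfsub, hfequ⟩ := (memA ne points hp f).mp hfA
    obtain ⟨hfP, hfcov⟩ := (pvEqUnion_iff f points).mp hfequ
    have hf1 : 1 ≤ f.length := List.length_pos_iff.mpr (hnonnil f hfcov)
    obtain ⟨hr1, hrle, hrcov, hrmin⟩ :=
      pvGo_spec f points (f.length + 1 - 1) 1 rfl (le_refl 1) hf1
        (by intro t h1 h2; omega) (hfull f hfequ)
    set r := pvGo f points 1 f.length with hrdef
    obtain ⟨g, hgmem, hgequ⟩ := List.any_eq_true.mp hrcov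
    obtain ⟨hgsub, hglen⟩ := List.mem_sublistsLen.mp hgmem
    obtain ⟨hgP, hgcov⟩ := (pvEqUnion_iff g points).mp hgequ
    have hgcand : g.Sublist cand := by
      apply (sub_cand_iff opens points g).mpr
      refine ⟨hgsub.trans hfsub, ?_⟩
      intro U hU
      simp only [List.all_eq_true, List.contains_eq_mem, decide_eq_true_eq]
      exact fun y hy => hgP U hU y hy
    have hirr : ∀ i < g.length, pvCovers (g.eraseIdx i) points = false := by
      intro i hi
      by_contra hcontra
      rw [Bool.not_eq_false] at hcontra
      have hesub : (g.eraseIdx i).Sublist g := List.eraseIdx_sublist g i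
      have helen : (g.eraseIdx i).length = g.length - 1 := by
        rw [List.length_eraseIdx]; simp [hi]
      have heequ : pvEqUnion (g.eraseIdx i) points = true :=
        (pvEqUnion_iff _ points).mpr ⟨fun U hU y hy => hgP U (hesub.subset hU) y hy, hcontra⟩
      rcases Nat.lt_or_ge 1 r with hr2 | hr2
      · have hany : ((List.sublistsLen (r - 1) f).any (fun sub => pvEqUnion sub points)) = true :=
          List.any_eq_true.mpr ⟨g.eraseIdx i,
            List.mem_sublistsLen.mpr ⟨hesub.trans hgsub, by omega⟩, heequ⟩
        have hmin := hrmin (r - 1) (by omega) (by omega)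
        simp [hany] at hmin
      · have hnil : g.eraseIdx i = [] := by
          have : (g.eraseIdx i).length = 0 := by omega
          exact List.length_eq_zero_iff.mp this
        rw [hnil] at hcontra
        exact (hnonnil [] hcontra) rfl
    apply le_foldl_max
    rw [List.mem_map]
    refine ⟨g, ?_, hglen⟩
    rw [List.mem_filter]
    refine ⟨(mem_subfams cand g).mpr hgcand, ?_⟩
    show (pvCovers g points &&
      (List.range g.length).all (fun i => !pvCovers (g.take i ++ g.drop (i + 1)) points)) = true
    rw [Bool.and_eq_true]
    exact ⟨hgcov, (pvIrred_iff g points).mpr hirr⟩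
  · -- each irredundant cover B accepts is a family whose A-bound is its size
    apply foldl_max_le _ _ _ (Nat.zero_le _)
    intro x hx
    rw [List.mem_map] at hx
    obtain ⟨g, hgmem, rfl⟩ := hx
    rw [List.mem_filter] at hgmem
    obtain ⟨hgfams, hgc⟩ := hgmem
    have hgcand := (mem_subfams cand g).mp hgfams
    rw [Bool.and_eq_true] at hgc
    obtain ⟨hgcov, hgirr'⟩ := hgc
    have hgirr := (pvIrred_iff g points).mp hgirr'
    obtain ⟨hgsubne, hgallP⟩ := (sub_cand_iff opens points g).mp hgcand
    have hgP : ∀ U ∈ g, ∀ y ∈ U, y ∈ points := by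
      intro U hU y hy
      have := hgallP U hU
      simp only [List.all_eq_true, List.contains_eq_mem, decide_eq_true_eq] at this
      exact this y hy
    have hgequ : pvEqUnion g points = true := (pvEqUnion_iff g points).mpr ⟨hgP, hgcov⟩
    have hg1 : 1 ≤ g.length := List.length_pos_iff.mpr (hnonnil g hgcov)
    obtain ⟨hr1, hrle, hrcov, hrmin⟩ :=
      pvGo_spec g points (g.length + 1 - 1) 1 rfl (le_refl 1) hg1
        (by intro t h1 h2; omega) (hfull g hgequ)
    set r := pvGo g points 1 g.length with hrdef
    have hreq : r = g.length := by
      rcases Nat.lt_or_ge r g.length with hlt | hge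
      · obtain ⟨h, hhmem, hhequ⟩ := List.any_eq_true.mp hrcov
        obtain ⟨hhsub, hhlen⟩ := List.mem_sublistsLen.mp hhmem
        obtain ⟨i, hi, hhsub'⟩ := exists_eraseIdx_of_lt hhsub (by omega)
        have hcov' := pvCovers_mono hhsub' ((pvEqUnion_iff h points).mp hhequ).2
        rw [hgirr i hi] at hcov'
        exact absurd hcov' (by simp)
      · omega
    rw [← hreq]
    apply le_foldl_max
    rw [List.mem_map]
    exact ⟨g, (memA ne points hp g).mpr ⟨hgsubne, hgequ⟩, hrdef.symm⟩

-- ===== VERDICT (by name: the statement is the Claim_ definition above) =====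
theorem finite_lindelof_number_py_spec : Claim_equal_finite_lindelof_number_py := by
  intro points opens _
  unfold Spec_finite_lindelof_number_py
  by_cases hpe : points.isEmpty = true
  · simp [finite_lindelof_number_py, finite_lindelof_number_py_alt, hpe]
  · have hp : points ≠ [] := by simpa [List.isEmpty_iff] using hpe
    simp only [finite_lindelof_number_py, finite_lindelof_number_py_alt]
    rw [if_neg hpe, if_neg hpe]
    exact_mod_cast core_eq points opens hp
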